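-- pv_equiv track=rewrite | github.com/HJG827/python-assignment | 0317/5207.py | binary_search_with_direction
-- ===== SOURCE A (Python) =====
-- def check_dir(lst):
--     now_dir = 0
--     for i in range(len(lst)):
--         if now_dir != lst[i]:
--             now_dir = lst[i]
--         else:
--             return False
--     return True
--
-- def binary_search_with_direction(A, target):
--     l, r = 0, len(A)-1
--     directions = []  # 각 단계에서 선택한 방향을 기록: 'L' 또는 'R'
--
--     while l <= r:
--         m = (l + r) // 2
--         if A[m] == target:
--             # 만약 첫 비교에서 바로 찾았다면, 조건 만족 (방향 전환 고려 안 함)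
--             if not directions:
--                 return True
--             # 아니면, 방향 문자열에 양쪽이 번갈아 나오는지 확인 (예: "R", "L" 포함)
--             # 간단하게, directions에 'L'과 'R' 모두 나타나면 조건 만족
--             if check_dir(directions):
--                 return True
--             else:
--                 return False
--         elif A[m] < target:
--             directions.append('R')
--             l = m + 1
--         else:
--             directions.append('L')
--             r = m - 1
--
--     return False  # target not found
-- ===== SOURCE B (Python) =====
-- def binary_search_with_direction(A, target):
--     l, r = 0, len(A) - 1
--     prev = None       # last direction taken: 'L' or 'R'
--     alternating = True  # running flag: directions so far strictly alternate
--     while l <= r: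
--         m = (l + r) // 2
--         if A[m] == target:
--             return alternating
--         d = 'R' if A[m] < target else 'L'
--         if d == prev:
--             alternating = False
--         prev = d
--         if d == 'R':
--             l = m + 1
--         else:
--             r = m - 1
--     return False
-- ===== Notes on version B (the rewrite author's own statement) =====
-- stated objective: simpler
-- what changed: Replaces the recorded directions list plus the separate check_dir rescan with a single streaming pass that keeps only the previous direction and a running alternation flag.
import Mathlib
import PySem

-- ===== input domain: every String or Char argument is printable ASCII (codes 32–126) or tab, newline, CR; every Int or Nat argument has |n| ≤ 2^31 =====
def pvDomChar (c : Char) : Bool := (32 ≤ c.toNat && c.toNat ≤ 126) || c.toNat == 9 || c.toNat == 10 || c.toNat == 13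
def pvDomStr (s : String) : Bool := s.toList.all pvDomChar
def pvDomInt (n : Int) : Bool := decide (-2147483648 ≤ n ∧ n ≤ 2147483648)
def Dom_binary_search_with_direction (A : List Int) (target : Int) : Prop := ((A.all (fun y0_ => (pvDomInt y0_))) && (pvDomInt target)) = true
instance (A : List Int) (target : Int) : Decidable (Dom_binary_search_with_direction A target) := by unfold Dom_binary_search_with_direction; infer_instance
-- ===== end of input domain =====

-- B replaces A's recorded directions list + check_dir rescan by a single streaming pass
-- keeping only the previous direction and a running alternation flag (simpler, O(1) extra space).

-- ===== PORT A =====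
-- check_dir: now_dir starts as 0, which differs from every char; ported as Option Char (none = 0).
def check_dir (lst : List Char) : Bool :=
  checkDirLoop none lst
where
  checkDirLoop : Option Char → List Char → Bool
    | _, [] => true
    | now, x :: rest => if now ≠ some x then checkDirLoop (some x) rest else false

-- the while loop; A[m] is always in range when l ≤ r (0 ≤ l ≤ m ≤ r ≤ len-1), so getD 0 is exact
def bswdLoopA (A : List Int) (target : Int) (l r : Int) (directions : List Char) : Bool :=
  if h : l ≤ r then
    let m := PySem.Int.floordiv (l + r) 2
    let v := (PySem.List.pyGet? A m).getD 0
    if v = target then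
      if directions = [] then true
      else if check_dir directions then true else false
    else if v < target then
      bswdLoopA A target (m + 1) r (directions ++ ['R'])
    else
      bswdLoopA A target l (m - 1) (directions ++ ['L'])
  else false
termination_by (r - l + 1).toNat
decreasing_by
  · have := PySem.Int.floordiv_two_mid_bounds h; omega
  · have := PySem.Int.floordiv_two_mid_bounds h; omega

def binary_search_with_direction (A : List Int) (target : Int) : Bool :=
  bswdLoopA A target 0 ((A.length : Int) - 1) []

-- ===== PORT B =====
def bswdLoopB (A : List Int) (target : Int) (l r : Int) (prev : Option Char) (alternating : Bool) : Bool :=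
  if h : l ≤ r then
    let m := PySem.Int.floordiv (l + r) 2
    let v := (PySem.List.pyGet? A m).getD 0
    if v = target then alternating
    else
      let d : Char := if v < target then 'R' else 'L'
      let alternating' := if some d = prev then false else alternating
      if d = 'R' then bswdLoopB A target (m + 1) r (some d) alternating'
      else bswdLoopB A target l (m - 1) (some d) alternating'
  else false
termination_by (r - l + 1).toNat
decreasing_by
  · have := PySem.Int.floordiv_two_mid_bounds h; omega
  · have := PySem.Int.floordiv_two_mid_bounds h; omega

def binary_search_with_direction_alt (A : List Int) (target : Int) : Bool :=
  bswdLoopB A target 0 ((A.length : Int) - 1) none true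

-- ===== PRECONDITION & SPEC =====
def Spec_binary_search_with_direction (A : List Int) (target : Int) (out : Bool) : Prop := out = binary_search_with_direction_alt A target
instance (A : List Int) (target : Int) (out : Bool) : Decidable (Spec_binary_search_with_direction A target out) := by unfold Spec_binary_search_with_direction; infer_instance

-- ===== CLAIM (what is proved, stated in full; the proofs are below) =====
def Claim_equal_binary_search_with_direction : Prop := ∀ (A : List Int) (target : Int), Dom_binary_search_with_direction A target → Spec_binary_search_with_direction A target (binary_search_with_direction A target)

-- ===== LEMMAS AND PROOFS =====

-- last direction of the recorded list, seeded with the current now/prev value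
def lastDir (now : Option Char) : List Char → Option Char
  | [] => now
  | x :: rest => lastDir (some x) rest

lemma lastDir_append (now : Option Char) (ds : List Char) (d : Char) :
    lastDir now (ds ++ [d]) = some d := by
  induction ds generalizing now with
  | nil => rfl
  | cons x rest ih => simpa [lastDir] using ih (some x)

lemma checkDirLoop_append (now : Option Char) (ds : List Char) (d : Char) :
    check_dir.checkDirLoop now (ds ++ [d]) =
      (check_dir.checkDirLoop now ds && decide (lastDir now ds ≠ some d)) := by
  induction ds generalizing now with
  | nil => simp [check_dir.checkDirLoop, lastDir]
  | cons x rest ih =>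
      by_cases hx : now = some x <;>
        simp [check_dir.checkDirLoop, lastDir, hx, ih]

-- loop invariant: B's state (prev, alternating) summarises A's directions list
lemma loop_invariant (A : List Int) (target : Int) (l r : Int) (ds : List Char) :
    bswdLoopA A target l r ds =
      bswdLoopB A target l r (lastDir none ds) (check_dir.checkDirLoop none ds) := by
  rw [bswdLoopA, bswdLoopB]
  split
  · next h =>
    have hfd : PySem.Int.floordiv (l + r) 2 = (l + r) / 2 :=
      PySem.Int.floordiv_eq_ediv_of_pos (by norm_num)
    by_cases hveq : (PySem.List.pyGet? A ((l + r) / 2)).getD 0 = target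
    · cases ds with
      | nil => simp [hveq, check_dir.checkDirLoop]
      | cons x rest => simp [hveq, check_dir]
    · by_cases hvlt : (PySem.List.pyGet? A ((l + r) / 2)).getD 0 < target
      · have hrec := loop_invariant A target (PySem.Int.floordiv (l + r) 2 + 1) r (ds ++ ['R'])
        rw [checkDirLoop_append, lastDir_append, hfd] at hrec
        by_cases hlast : lastDir none ds = some 'R' <;>
          simp [hveq, hvlt, hlast, hrec, Bool.and_comm, eq_comm]
      · have hrec := loop_invariant A target l (PySem.Int.floordiv (l + r) 2 - 1) (ds ++ ['L'])
        rw [checkDirLoop_append, lastDir_append, hfd] at hrec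
        by_cases hlast : lastDir none ds = some 'L' <;>
          simp [hveq, hvlt, hlast, hrec, Bool.and_comm, eq_comm]
  · rfl
termination_by (r - l + 1).toNat
decreasing_by
  all_goals
    have := PySem.Int.floordiv_two_mid_bounds (show l ≤ r by assumption)
    omega

-- ===== VERDICT (by name: the statement is the Claim_ definition above) =====
theorem binary_search_with_direction_spec : Claim_equal_binary_search_with_direction := by
  intro A target _
  unfold Spec_binary_search_with_direction binary_search_with_direction binary_search_with_direction_alt
  simpa using loop_invariant A target 0 ((A.length : Int) - 1) []
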